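-- pv_equiv track=rewrite | github.com/hyoeun98/boj | 프로그래머스/lv3/131129. 카운트 다운/카운트 다운.py | solution
-- ===== SOURCE A (Python) =====
-- def solution(target):
--     answer = [0, 0]
--     single_or_bull = [i for i in range(1, 21)] + [50]
--     double_or_triple = list(set([i*2 for i in range(1, 21) if i * 2 > 20] + [i*3 for i in range(1, 21) if i * 3 > 20]))
--
--     dp = [[100001, 0] for _ in range(target+1)]
--     dp[0] = [0, 0]
--     for i in filter(lambda x: x <= target, single_or_bull):
--         dp[i] = [1, 1]
--
--     for i in filter(lambda x: x <= target, double_or_triple):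
--         dp[i] = [1, 0]
--
--     for s in single_or_bull + double_or_triple:
--         for i in range(s, target + 1):
--             if dp[i][0] > (sum_of_dp := dp[i - s][0] + dp[s][0]):
--                 dp[i] = [sum(x) for x in zip(dp[i - s], dp[s])]
--             elif sum_of_dp == dp[i][0] and dp[i][1] < dp[i - s][1] + dp[s][1]:
--                 dp[i] = [sum(x) for x in zip(dp[i - s], dp[s])]
--
--     return dp[target]
-- ===== SOURCE B (Python) =====
-- MAX_THROWS = 100001  # one more than the largest possible answer (target <= 100000); "unreachable"
--
-- def solution(target):
--     # BFS over exact totals 0..target: each throw is a unit-cost edge; expand level by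
--     # level, recording at first reach the minimum number of throws and, settled within
--     # the level, the maximum number of singles/bull throws among minimum-throw paths.
--     singles = set(range(1, 21)) | {50}
--     scores = sorted(singles | {2 * k for k in range(11, 21)} | {3 * k for k in range(7, 21)})
--     throws = [None] * (target + 1)
--     maxs = [0] * (target + 1)
--     throws[0] = 0
--     frontier = [0]
--     level = 0
--     while throws[target] is None and level < MAX_THROWS:
--         level += 1
--         new = []
--         for v in frontier:
--             for s in scores:
--                 w = v + s
--                 if w <= target:
--                     gain = maxs[v] + (s in singles)
--                     if throws[w] is None:
--                         throws[w] = level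
--                         maxs[w] = gain
--                         new.append(w)
--                     elif throws[w] == level and maxs[w] < gain:
--                         maxs[w] = gain
--         frontier = new
--     if throws[target] is None:
--         return [MAX_THROWS, 0]
--     return [throws[target], maxs[target]]
-- ===== Notes on version B (the rewrite author's own statement) =====
-- stated objective: faster
-- what changed: Replaces A's sentinel-initialised per-coin relaxation DP (seed passes, then for each of the 42 scores a full sweep over every value with explicit tie-break updates) by a level-synchronous BFS from the zero total: a frontier of newly reached totals is expanded one throw per level (at most 100001 levels, the same 'unreachable' sentinel A's table is initialised with), min throws recorded on first reach and the max-singles tie-break settled within the level before advancing.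
import Mathlib
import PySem

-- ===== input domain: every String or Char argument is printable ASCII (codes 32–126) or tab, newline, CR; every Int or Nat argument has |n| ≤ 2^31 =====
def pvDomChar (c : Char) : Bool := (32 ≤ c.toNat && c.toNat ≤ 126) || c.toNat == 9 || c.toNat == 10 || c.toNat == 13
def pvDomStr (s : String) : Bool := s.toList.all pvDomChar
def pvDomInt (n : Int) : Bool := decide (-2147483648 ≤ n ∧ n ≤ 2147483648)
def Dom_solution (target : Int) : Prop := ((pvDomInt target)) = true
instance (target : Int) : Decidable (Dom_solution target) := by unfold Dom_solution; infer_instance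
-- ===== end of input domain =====

-- B replaces A's sentinel-initialised per-coin relaxation DP by a level-synchronous BFS from
-- the zero total: a frontier of newly reached totals is expanded one throw per level (at most
-- 100001 levels, the ports' shared 'unreachable' sentinel), recording min throws on first reach
-- and settling the max-singles tie-break within the level (measured faster by a constant factor).
set_option maxRecDepth 100000
set_option maxHeartbeats 1000000


-- ===== PORT A =====
-- dp[j] of the mutable Python list, as a total lookup (indices used are always in range)
def pvGetA (d : List (Int × Int)) (j : Int) : Int × Int := d.getD j.toNat (0, 0)

def pvSingleOrBull : List Int := PySem.List.pyRange 1 21 1 ++ [50]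

def pvDoubleOrTriple : List Int :=
  PySem.Set.ofList
    ((((PySem.List.pyRange 1 21 1).filter (fun i => decide (20 < i * 2))).map (fun i => i * 2)) ++
     (((PySem.List.pyRange 1 21 1).filter (fun i => decide (20 < i * 3))).map (fun i => i * 3)))

-- the body of A's inner relaxation loop
def pvAStepF (s : Int) (d : List (Int × Int)) (i : Int) : List (Int × Int) :=
  let sum_of_dp := (pvGetA d (i - s)).1 + (pvGetA d s).1
  if sum_of_dp < (pvGetA d i).1 then
    d.set i.toNat ((pvGetA d (i - s)).1 + (pvGetA d s).1, (pvGetA d (i - s)).2 + (pvGetA d s).2)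
  else if sum_of_dp = (pvGetA d i).1 ∧ (pvGetA d i).2 < (pvGetA d (i - s)).2 + (pvGetA d s).2 then
    d.set i.toNat ((pvGetA d (i - s)).1 + (pvGetA d s).1, (pvGetA d (i - s)).2 + (pvGetA d s).2)
  else d

def pvAInner (target s : Int) (d : List (Int × Int)) : List (Int × Int) :=
  (PySem.List.pyRange s (target + 1) 1).foldl (pvAStepF s) d

def solution (target : Int) : List Int :=
  let dp0 : List (Int × Int) := (List.replicate (target + 1).toNat ((100001:Int), (0:Int))).set 0 (0, 0)
  let dp1 := (pvSingleOrBull.filter (fun x => decide (x ≤ target))).foldl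
      (fun d i => d.set i.toNat (1, 1)) dp0
  let dp2 := (pvDoubleOrTriple.filter (fun x => decide (x ≤ target))).foldl
      (fun d i => d.set i.toNat (1, 0)) dp1
  let dp3 := (pvSingleOrBull ++ pvDoubleOrTriple).foldl (fun d s => pvAInner target s d) dp2
  [(pvGetA dp3 target).1, (pvGetA dp3 target).2]

-- ===== PORT B =====
def pvSingles : PySem.Set Int :=
  PySem.Set.union (PySem.Set.ofList (PySem.List.pyRange 1 21 1)) [(50 : Int)]

def pvScores : List Int :=
  PySem.List.sorted
    (PySem.Set.union
      (PySem.Set.union pvSingles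
        (PySem.Set.ofList ((PySem.List.pyRange 11 21 1).map (fun k => k * 2))))
      (PySem.Set.ofList ((PySem.List.pyRange 7 21 1).map (fun k => k * 3))))
    (fun x => x) false

-- throws[j] (list of None/int) and maxs[j] of the Python lists (indices used are in range)
def pvGetT (t : List (Option Int)) (j : Int) : Option Int := t.getD j.toNat none
def pvGetM (m : List Int) (j : Int) : Int := m.getD j.toNat 0

-- body of B's innermost loop: visit w = v + s from frontier value v
def pvBVisit (target level : Int) (st : List (Option Int) × List Int × List Int)
    (v s : Int) : List (Option Int) × List Int × List Int :=
  let w := v + s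
  if w ≤ target then
    let gain := pvGetM st.2.1 v + (if PySem.Set.contains pvSingles s then 1 else 0)
    match pvGetT st.1 w with
    | none => (st.1.set w.toNat (some level), st.2.1.set w.toNat gain, st.2.2 ++ [w])
    | some d =>
      if d = level ∧ pvGetM st.2.1 w < gain then (st.1, st.2.1.set w.toNat gain, st.2.2)
      else st
  else st

-- one BFS level: expand every frontier value by every score, collecting the new frontier
def pvBLevel (target level : Int) (throws : List (Option Int)) (maxs : List Int)
    (frontier : List Int) : List (Option Int) × List Int × List Int :=
  frontier.foldl (fun acc v => pvScores.foldl (fun a s => pvBVisit target level a v s) acc)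
    (throws, maxs, [])

-- the while-loop (at most MAX_THROWS = 100001 levels); fuel only makes it total —
-- 100002 provably always suffices, since each pass raises level by one
def pvBLoop (target : Int) : Nat → Int → List (Option Int) × List Int × List Int →
    List (Option Int) × List Int
  | 0, _, st => (st.1, st.2.1)
  | Nat.succ n, level, st =>
    match pvGetT st.1 target with
    | some _ => (st.1, st.2.1)
    | none =>
      if level < 100001 then
        pvBLoop target n (level + 1) (pvBLevel target (level + 1) st.1 st.2.1 st.2.2)
      else (st.1, st.2.1)

def solution_alt (target : Int) : List Int :=
  let throws0 := (List.replicate (target + 1).toNat (none : Option Int)).set 0 (some 0)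
  let maxs0 := List.replicate (target + 1).toNat (0 : Int)
  let res := pvBLoop target 100002 0 (throws0, maxs0, [0])
  match pvGetT res.1 target with
  | some d => [d, pvGetM res.2 target]
  | none => [100001, 0]

-- ===== PRECONDITION & SPEC =====
-- Pre_ excludes exactly the negative targets, on which A raises IndexError (dp[0] = [0, 0]
-- on an empty list); B raises there too.
def Pre_solution (target : Int) : Prop := 0 ≤ target
instance (target : Int) : Decidable (Pre_solution target) := by unfold Pre_solution; infer_instance
def pvWitness_solution : Int := (101)

def Spec_solution (target : Int) (out : List Int) : Prop := out = solution_alt target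
instance (target : Int) (out : List Int) : Decidable (Spec_solution target out) := by
  unfold Spec_solution; infer_instance

-- ===== CLAIM (what is proved, stated in full; the proofs are below) =====
def Claim_equal_solution : Prop :=
  ∀ (target : Int), Dom_solution target → Pre_solution target → Spec_solution target (solution target)

-- ===== LEMMAS AND PROOFS =====

-- the 42 reachable one-throw scores, as the A port lists them
def pvC : List Int := pvSingleOrBull ++ pvDoubleOrTriple

def pvSingleP (x : Int) : Bool := decide (x ≤ 20 ∨ x = 50)
def pvE (x : Int) : Int := if pvSingleP x then 1 else 0
-- cost of a decomposition: (number of throws, number of singles)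
def pvCost (l : List Int) : Int × Int := ((l.length : Int), (l.countP pvSingleP : Int))

-- decompositions available while the coin prefix P has been relaxed:
-- all throws are scores, they sum to i, and at most one throw is outside P
def pvDec (P : List Int) (i : Int) (l : List Int) : Prop :=
  (∀ x ∈ l, x ∈ pvC) ∧ l.sum = i ∧ l.countP (fun x => decide (x ∉ P)) ≤ 1

-- "at least as good": fewer throws, or equally many with at least as many singles
def pvLe (v w : Int × Int) : Prop := v.1 < w.1 ∨ (v.1 = w.1 ∧ w.2 ≤ v.2)

-- what A's dp entry holds: the optimum among pvDec P decompositions, capped at the sentinel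
def pvOptC (P : List Int) (i : Int) (v : Int × Int) : Prop :=
  ((∃ l, pvDec P i l ∧ pvCost l = v ∧ v.1 ≤ 100001) ∨
    (v = (100001, 0) ∧ ∀ l, pvDec P i l → 100001 < (pvCost l).1)) ∧
  (∀ l, pvDec P i l → (pvCost l).1 ≤ 100001 → pvLe v (pvCost l))

def pvDecA (i : Int) (l : List Int) : Prop := (∀ x ∈ l, x ∈ pvC) ∧ l.sum = i

-- ---------- basic facts ----------
lemma pvC_bounds : ∀ x ∈ pvC, 1 ≤ x ∧ x ≤ 60 := by decide
lemma pvScores_sub : ∀ x ∈ pvScores, x ∈ pvC := by decide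
lemma pvC_sub : ∀ x ∈ pvC, x ∈ pvScores := by decide
lemma pvSingles_contains : ∀ x ∈ pvC, PySem.Set.contains pvSingles x = pvSingleP x := by decide
lemma pvLe_refl (v : Int × Int) : pvLe v v := by right; omega
lemma pvLe_trans {u v w : Int × Int} (h1 : pvLe u v) (h2 : pvLe v w) : pvLe u w := by
  unfold pvLe at *; omega
lemma pvLe_antisymm {v w : Int × Int} (h1 : pvLe v w) (h2 : pvLe w v) : v = w := by
  unfold pvLe at *
  have : v.1 = w.1 ∧ v.2 = w.2 := by omega
  exact Prod.ext this.1 this.2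
lemma pvLe_add {v w : Int × Int} (e : Int) (h : pvLe v w) :
    pvLe (v.1 + 1, v.2 + e) (w.1 + 1, w.2 + e) := by unfold pvLe at *; simp; omega

lemma pvCost_nonneg (l : List Int) : 0 ≤ (pvCost l).1 ∧ 0 ≤ (pvCost l).2 := by
  unfold pvCost; constructor <;> simp

lemma pvSum_nonneg {l : List Int} (h : ∀ x ∈ l, x ∈ pvC) : 0 ≤ l.sum := by
  induction l with
  | nil => simp
  | cons a t ih =>
    have ha := (pvC_bounds a (h a (by simp))).1
    have := ih (fun x hx => h x (by simp [hx]))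
    simp; omega

lemma pvMem_le_sum {l : List Int} (h : ∀ x ∈ l, x ∈ pvC) {x : Int} (hx : x ∈ l) :
    x ≤ l.sum := by
  induction l with
  | nil => simp at hx
  | cons a t ih =>
    have ht : ∀ y ∈ t, y ∈ pvC := fun y hy => h y (by simp [hy])
    have hst := pvSum_nonneg ht
    rcases List.mem_cons.mp hx with rfl | hx'
    · simp; omega
    · have := ih ht hx'
      have ha := (pvC_bounds a (h a (by simp))).1
      simp; omega

lemma pvSum_eq_zero {l : List Int} (h : ∀ x ∈ l, x ∈ pvC) (h0 : l.sum = 0) : l = [] := by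
  cases l with
  | nil => rfl
  | cons a t =>
    exfalso
    have ha := (pvC_bounds a (h a (List.mem_cons_self))).1
    have ht := pvSum_nonneg (fun x hx => h x (List.mem_cons_of_mem a hx))
    rw [List.sum_cons] at h0; omega

-- ---------- pvDec manipulation ----------
lemma pvDec_mono {P : List Int} (s : Int) {i : Int} {l : List Int} (h : pvDec P i l) :
    pvDec (P ++ [s]) i l := by
  obtain ⟨hc, hsum, hcnt⟩ := h
  refine ⟨hc, hsum, le_trans ?_ hcnt⟩
  apply List.countP_mono_left
  intro a _ ha
  simp only [decide_eq_true_eq, List.mem_append] at ha ⊢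
  tauto

lemma pvDec_cons {P : List Int} {s i : Int} {l : List Int}
    (hs : s ∈ pvC) (hsP : s ∈ P) (h : pvDec P (i - s) l) : pvDec P i (s :: l) := by
  obtain ⟨hc, hsum, hcnt⟩ := h
  refine ⟨?_, ?_, ?_⟩
  · intro x hx
    rcases List.mem_cons.mp hx with rfl | hx'
    · exact hs
    · exact hc x hx'
  · rw [List.sum_cons, hsum]; ring
  · rw [List.countP_cons]
    simp only [hsP, not_true_eq_false, decide_false]
    simpa using hcnt

lemma pvDec_erase {P : List Int} {s i : Int} {l : List Int}
    (hsl : s ∈ l) (h : pvDec P i l) : pvDec P (i - s) (l.erase s) := by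
  obtain ⟨hc, hsum, hcnt⟩ := h
  have hperm := List.perm_cons_erase hsl
  refine ⟨fun x hx => hc x (List.mem_of_mem_erase hx), ?_, ?_⟩
  · have := hperm.sum_eq
    rw [List.sum_cons] at this
    omega
  · exact le_trans (List.Sublist.countP_le List.erase_sublist) hcnt

lemma pvCost_erase {s : Int} {l : List Int} (hsl : s ∈ l) :
    pvCost l = ((pvCost (l.erase s)).1 + 1, (pvCost (l.erase s)).2 + pvE s) := by
  have hperm := List.perm_cons_erase hsl
  unfold pvCost pvE
  have hlen : l.length = (l.erase s).length + 1 := by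
    have := hperm.length_eq; simpa using this
  have hcnt : l.countP pvSingleP = (l.erase s).countP pvSingleP + (if pvSingleP s then 1 else 0) := by
    have := hperm.countP_eq pvSingleP
    rw [List.countP_cons] at this
    omega
  refine Prod.ext ?_ ?_ <;> simp [hlen, hcnt]

lemma pvCountP_congr_notmem {P : List Int} {s : Int} {l : List Int} (hns : s ∉ l) :
    l.countP (fun x => decide (x ∉ P ++ [s])) = l.countP (fun x => decide (x ∉ P)) := by
  apply List.countP_congr
  intro a ha
  have : a ≠ s := fun h => hns (h ▸ ha)
  simp [List.mem_append, this]
lemma pvDec_not_mem {P : List Int} {s i : Int} {l : List Int}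
    (hns : s ∉ l) (h : pvDec (P ++ [s]) i l) : pvDec P i l := by
  obtain ⟨hc, hsum, hcnt⟩ := h
  refine ⟨hc, hsum, ?_⟩
  rw [← pvCountP_congr_notmem hns]
  exact hcnt

lemma pvDec_below {P : List Int} {s i : Int} (hi : i < s) {l : List Int} :
    pvDec (P ++ [s]) i l ↔ pvDec P i l := by
  constructor
  · intro h
    have hns : s ∉ l := by
      intro hsl
      have h1 := pvMem_le_sum h.1 hsl
      have h2 := h.2.1
      omega
    exact pvDec_not_mem hns h
  · exact pvDec_mono s

lemma pvOptC_ext {P P' : List Int} {i : Int} (h : ∀ l, pvDec P' i l ↔ pvDec P i l)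
    {v : Int × Int} (hv : pvOptC P i v) : pvOptC P' i v := by
  obtain ⟨h1, h2⟩ := hv
  refine ⟨?_, fun l hl => h2 l ((h l).mp hl)⟩
  rcases h1 with ⟨l, hl, hc⟩ | ⟨he, hall⟩
  · exact Or.inl ⟨l, (h l).mpr hl, hc⟩
  · exact Or.inr ⟨he, fun l hl => hall l ((h l).mp hl)⟩

lemma pvOptC_le_sentinel {P : List Int} {i : Int} {v : Int × Int} (h : pvOptC P i v) :
    v.1 ≤ 100001 := by
  rcases h.1 with ⟨l, _, hc, hle⟩ | ⟨he, _⟩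
  · exact hle
  · subst he; norm_num

lemma pvDec_single {P : List Int} {s : Int} (hs : s ∈ pvC) : pvDec P s [s] := by
  refine ⟨by simpa using hs, by simp, ?_⟩
  rw [List.countP_cons]
  simp only [List.countP_nil]
  split_ifs <;> omega
lemma pvCost_single (s : Int) : pvCost [s] = (1, pvE s) := by
  unfold pvCost pvE
  rw [List.countP_cons]
  simp only [List.countP_nil]
  split_ifs <;> simp
lemma pvOptC_coin {P : List Int} {s : Int} (hs : s ∈ pvC) {w : Int × Int}
    (hw : pvOptC P s w) : w = (1, pvE s) := by
  have hs1 := (pvC_bounds s hs).1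
  have hds : pvDec P s [s] := pvDec_single hs
  have hlb := hw.2 [s] hds (by rw [pvCost_single]; norm_num)
  rw [pvCost_single] at hlb
  rcases hw.1 with ⟨l, hl, hc, _⟩ | ⟨he, hall⟩
  · have hlen1 : w.1 ≤ 1 := by unfold pvLe at hlb; simp at hlb; omega
    have hlnil : l ≠ [] := by
      intro h0
      rw [h0] at hl hc
      have : (0:Int) = s := hl.2.1.symm ▸ rfl
      omega
    cases l with
    | nil => exact absurd rfl hlnil
    | cons a t =>
      have hlc : w.1 = ((a :: t).length : Int) := by rw [← hc]; rfl
      cases t with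
      | cons b u =>
        exfalso
        rw [List.length_cons, List.length_cons] at hlc
        push_cast at hlc
        omega
      | nil =>
        have has : a = s := by
          have := hl.2.1
          simpa using this
        subst has
        rw [← hc, pvCost_single]
  · exfalso
    have := hall [s] hds
    rw [pvCost_single] at this
    omega

lemma pvDec_nil (P : List Int) : pvDec P 0 [] := ⟨by simp, by simp, by simp⟩
lemma pvCost_nil : pvCost [] = (0, 0) := by unfold pvCost; simp
lemma pvOptC_zero (P : List Int) : pvOptC P 0 (0, 0) := by
  constructor
  · exact Or.inl ⟨[], pvDec_nil P, by rw [pvCost_nil], by norm_num⟩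
  · intro l hl _
    have := pvSum_eq_zero hl.1 hl.2.1
    subst this
    rw [pvCost_nil]
    exact pvLe_refl _

-- ---------- the combine (relaxation) step ----------
lemma pvCost_cons (s : Int) (l : List Int) :
    pvCost (s :: l) = ((pvCost l).1 + 1, (pvCost l).2 + pvE s) := by
  unfold pvCost pvE
  rw [List.countP_cons, List.length_cons]
  refine Prod.ext ?_ ?_ <;> simp

lemma pvE_nonneg (s : Int) : 0 ≤ pvE s := by unfold pvE; split_ifs <;> omega

lemma pvCombine {P : List Int} {s i : Int} (hs : s ∈ pvC) (_hs1 : 1 ≤ s) (_hsi : s ≤ i)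
    {v w : Int × Int} (hv : pvOptC P i v) (hw : pvOptC (P ++ [s]) (i - s) w) :
    pvOptC (P ++ [s]) i
      (if w.1 + 1 < v.1 then (w.1 + 1, w.2 + pvE s)
       else if w.1 + 1 = v.1 ∧ v.2 < w.2 + pvE s then (w.1 + 1, w.2 + pvE s)
       else v) := by
  have hv1 := pvOptC_le_sentinel hv
  have hw1 := pvOptC_le_sentinel hw
  have he0 := pvE_nonneg s
  have hsPs : s ∈ P ++ [s] := List.mem_append_right P (List.mem_singleton_self s)
  have hRlev : pvLe (if w.1 + 1 < v.1 then (w.1 + 1, w.2 + pvE s)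
       else if w.1 + 1 = v.1 ∧ v.2 < w.2 + pvE s then (w.1 + 1, w.2 + pvE s)
       else v) v := by
    split_ifs with h1 h2
    · exact Or.inl h1
    · exact Or.inr ⟨h2.1, by simp; omega⟩
    · exact pvLe_refl v
  have hRlec : pvLe (if w.1 + 1 < v.1 then (w.1 + 1, w.2 + pvE s)
       else if w.1 + 1 = v.1 ∧ v.2 < w.2 + pvE s then (w.1 + 1, w.2 + pvE s)
       else v) (w.1 + 1, w.2 + pvE s) := by
    split_ifs with h1 h2
    · exact pvLe_refl _
    · exact pvLe_refl _
    · unfold pvLe at *; simp at *; omega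
  constructor
  case right =>
    intro l hl hsent
    by_cases hmem : s ∈ l
    · have hDm := pvDec_erase hmem hl
      have hce := pvCost_erase hmem
      have hm1 : (pvCost (l.erase s)).1 ≤ 100001 := by
        have : (pvCost l).1 = (pvCost (l.erase s)).1 + 1 := by rw [hce]
        omega
      have hlew := hw.2 (l.erase s) hDm hm1
      have hup : pvLe (w.1 + 1, w.2 + pvE s) (pvCost l) := by
        rw [hce]
        exact pvLe_add (pvE s) hlew
      exact pvLe_trans hRlec hup
    · exact pvLe_trans hRlev (hv.2 l (pvDec_not_mem hmem hl) hsent)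
  case left =>
    rcases hw.1 with ⟨lw, hlw, hclw, hwle⟩ | ⟨hweq, hwall⟩
    · have hlc : pvDec (P ++ [s]) i (s :: lw) := pvDec_cons hs hsPs hlw
      have hcostc : pvCost (s :: lw) = (w.1 + 1, w.2 + pvE s) := by
        rw [pvCost_cons, hclw]
      have hw2nn : 0 ≤ w.2 := by
        rw [← hclw]
        exact (pvCost_nonneg lw).2
      by_cases hcle : w.1 + 1 ≤ 100001
      · split_ifs with h1 h2
        · exact Or.inl ⟨s :: lw, hlc, hcostc, hcle⟩
        · exact Or.inl ⟨s :: lw, hlc, hcostc, hcle⟩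
        · rcases hv.1 with ⟨lv, hlv, hclv, hvle⟩ | ⟨hveq, hvall⟩
          · exact Or.inl ⟨lv, pvDec_mono s hlv, hclv, hvle⟩
          · have hveq1 : v.1 = 100001 ∧ v.2 = 0 := by rw [hveq]; exact ⟨rfl, rfl⟩
            have hcand : w.1 + 1 = 100001 ∧ w.2 + pvE s = 0 := by omega
            refine Or.inl ⟨s :: lw, hlc, ?_, hv1⟩
            rw [hcostc, hveq]
            rw [Prod.ext_iff]
            exact ⟨hcand.1, hcand.2⟩
      · have hR : (if w.1 + 1 < v.1 then (w.1 + 1, w.2 + pvE s)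
            else if w.1 + 1 = v.1 ∧ v.2 < w.2 + pvE s then (w.1 + 1, w.2 + pvE s)
            else v) = v := by
          rw [if_neg (by omega), if_neg (by rintro ⟨h, -⟩; omega)]
        rw [hR]
        rcases hv.1 with ⟨lv, hlv, hclv, hvle⟩ | ⟨hveq, hvall⟩
        · exact Or.inl ⟨lv, pvDec_mono s hlv, hclv, hvle⟩
        · refine Or.inr ⟨hveq, ?_⟩
          intro l hl
          by_cases hmem : s ∈ l
          · have hDm := pvDec_erase hmem hl
            have hce := pvCost_erase hmem
            have hlc1 : (pvCost l).1 = (pvCost (l.erase s)).1 + 1 := by rw [hce]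
            by_cases hm2 : (pvCost (l.erase s)).1 ≤ 100001
            · have := hw.2 (l.erase s) hDm hm2
              unfold pvLe at this
              omega
            · omega
          · exact hvall l (pvDec_not_mem hmem hl)
    · have hweq1 : w.1 = 100001 ∧ w.2 = 0 := by rw [hweq]; exact ⟨rfl, rfl⟩
      have hR : (if w.1 + 1 < v.1 then (w.1 + 1, w.2 + pvE s)
          else if w.1 + 1 = v.1 ∧ v.2 < w.2 + pvE s then (w.1 + 1, w.2 + pvE s)
          else v) = v := by
        rw [if_neg (by omega), if_neg (by rintro ⟨h, -⟩; omega)]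
      rw [hR]
      rcases hv.1 with ⟨lv, hlv, hclv, hvle⟩ | ⟨hveq, hvall⟩
      · exact Or.inl ⟨lv, pvDec_mono s hlv, hclv, hvle⟩
      · refine Or.inr ⟨hveq, ?_⟩
        intro l hl
        by_cases hmem : s ∈ l
        · have := hwall (l.erase s) (pvDec_erase hmem hl)
          have hce := pvCost_erase hmem
          have hlc1 : (pvCost l).1 = (pvCost (l.erase s)).1 + 1 := by rw [hce]
          omega
        · exact hvall l (pvDec_not_mem hmem hl)

-- ---------- generic fold over pyRange ----------
lemma pvRange_foldl_inv {α : Type} (f : α → Int → α) (inv : Int → α → Prop) (a b : Int)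
    (hab : a ≤ b) (init : α) (h0 : inv a init)
    (hstep : ∀ c x, a ≤ c → c < b → inv c x → inv (c + 1) (f x c)) :
    inv b ((PySem.List.pyRange a b 1).foldl f init) := by
  obtain ⟨n, hn⟩ : ∃ n : Nat, b - a = (n : Int) := ⟨(b - a).toNat, by omega⟩
  induction n generalizing a init with
  | zero =>
    have hba : b = a := by omega
    rw [PySem.List.pyRange_one_eq_nil (by omega)]
    simpa [hba] using h0
  | succ n ih =>
    have hlt : a < b := by omega
    rw [PySem.List.pyRange_one_cons hlt, List.foldl_cons]
    exact ih (a + 1) (by omega) (f init a) (hstep a init le_rfl hlt h0)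
      (fun c x hc => hstep c x (by omega)) (by omega)

-- ---------- A-side invariants ----------
lemma pvGetA_set_self {d : List (Int × Int)} {i : Int} {v : Int × Int}
    (_h0 : 0 ≤ i) (hl : i.toNat < d.length) : pvGetA (d.set i.toNat v) i = v := by
  unfold pvGetA
  rw [List.getD_eq_getElem?_getD, List.getElem?_set_self (by omega)]
  simp

lemma pvGetA_set_ne {d : List (Int × Int)} {i j : Int} {v : Int × Int}
    (h0 : 0 ≤ i) (hj0 : 0 ≤ j) (hne : j ≠ i) : pvGetA (d.set i.toNat v) j = pvGetA d j := by
  unfold pvGetA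
  rw [List.getD_eq_getElem?_getD, List.getD_eq_getElem?_getD,
    List.getElem?_set_ne (by omega)]

def pvInv (target : Int) (P : List Int) (d : List (Int × Int)) : Prop :=
  d.length = (target + 1).toNat ∧ ∀ j, 0 ≤ j → j ≤ target → pvOptC P j (pvGetA d j)

lemma pvE_dt : ∀ x ∈ pvDoubleOrTriple, pvE x = 0 := by decide
lemma pvE_sb : ∀ x ∈ pvSingleOrBull, pvE x = 1 := by decide

lemma pvAStepF_eval {target s c : Int} {d : List (Int × Int)}
    (hlen : d.length = (target + 1).toNat) (hds : pvGetA d s = (1, pvE s))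
    (hc0 : 0 ≤ c) (hct : c ≤ target) :
    (pvAStepF s d c).length = d.length ∧
    ∀ j, 0 ≤ j → pvGetA (pvAStepF s d c) j =
      if j = c then
        (if (pvGetA d (c - s)).1 + 1 < (pvGetA d c).1 then
           ((pvGetA d (c - s)).1 + 1, (pvGetA d (c - s)).2 + pvE s)
         else if (pvGetA d (c - s)).1 + 1 = (pvGetA d c).1 ∧
             (pvGetA d c).2 < (pvGetA d (c - s)).2 + pvE s then
           ((pvGetA d (c - s)).1 + 1, (pvGetA d (c - s)).2 + pvE s)
         else pvGetA d c)
      else pvGetA d j := by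
  have hrange : c.toNat < d.length := by omega
  unfold pvAStepF
  rw [hds]
  simp only []
  split_ifs with h1 h2
  · refine ⟨by simp, ?_⟩
    intro j hj0
    by_cases hjc : j = c
    · subst hjc
      rw [if_pos rfl, pvGetA_set_self hc0 hrange]
    · rw [if_neg hjc, pvGetA_set_ne hc0 hj0 hjc]
  · refine ⟨by simp, ?_⟩
    intro j hj0
    by_cases hjc : j = c
    · subst hjc
      rw [if_pos rfl, pvGetA_set_self hc0 hrange]
    · rw [if_neg hjc, pvGetA_set_ne hc0 hj0 hjc]
  · refine ⟨rfl, ?_⟩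
    intro j hj0
    by_cases hjc : j = c
    · subst hjc
      rw [if_pos rfl]
    · rw [if_neg hjc]

lemma pvAInner_inv {target : Int} {P : List Int} {s : Int} (hs : s ∈ pvC)
    {d : List (Int × Int)} (hd : pvInv target P d) :
    pvInv target (P ++ [s]) (pvAInner target s d) := by
  have hs1 := (pvC_bounds s hs).1
  unfold pvAInner
  by_cases hst : target < s
  · rw [PySem.List.pyRange_one_eq_nil (by omega), List.foldl_nil]
    refine ⟨hd.1, ?_⟩
    intro j hj0 hjt
    exact pvOptC_ext (fun l => pvDec_below (by omega)) (hd.2 j hj0 hjt)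
  · rw [not_lt] at hst
    have hmain := pvRange_foldl_inv (pvAStepF s)
      (fun c d => d.length = (target + 1).toNat ∧
        ∀ j, 0 ≤ j → j ≤ target → pvOptC (if s ≤ j ∧ j < c then P ++ [s] else P) j (pvGetA d j))
      s (target + 1) (by omega) d
      (by
        refine ⟨hd.1, ?_⟩
        intro j hj0 hjt
        rw [if_neg (by omega)]
        exact hd.2 j hj0 hjt)
      (by
        intro c x hc hcb hinv
        have hc0 : (0:Int) ≤ c := by omega
        have hct : c ≤ target := by omega
        have dxs : pvGetA x s = (1, pvE s) := pvOptC_coin hs (hinv.2 s (by omega) (by omega))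
        have dvc : pvOptC P c (pvGetA x c) := by
          have := hinv.2 c hc0 hct
          rwa [if_neg (by omega)] at this
        have dw : pvOptC (P ++ [s]) (c - s) (pvGetA x (c - s)) := by
          have h2 := hinv.2 (c - s) (by omega) (by omega)
          by_cases hss : s ≤ c - s
          · rwa [if_pos ⟨hss, by omega⟩] at h2
          · rw [if_neg (by omega)] at h2
            exact pvOptC_ext (fun l => pvDec_below (by omega)) h2
        have hcomb := pvCombine hs hs1 (by omega : s ≤ c) dvc dw
        obtain ⟨heL, heV⟩ := pvAStepF_eval (target := target) hinv.1 dxs hc0 hct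
        refine ⟨by rw [heL]; exact hinv.1, ?_⟩
        intro j hj0 hjt
        rw [heV j hj0]
        by_cases hjc : j = c
        · subst hjc
          rw [if_pos rfl, if_pos ⟨by omega, by omega⟩]
          exact hcomb
        · rw [if_neg hjc]
          have hcond : (s ≤ j ∧ j < c + 1) ↔ (s ≤ j ∧ j < c) := by omega
          by_cases hx : s ≤ j ∧ j < c
          · rw [if_pos (hcond.mpr hx)]
            have := hinv.2 j hj0 hjt
            rwa [if_pos hx] at this
          · rw [if_neg (fun hcc => hx (hcond.mp hcc))]
            have := hinv.2 j hj0 hjt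
            rwa [if_neg hx] at this)
    refine ⟨hmain.1, ?_⟩
    intro j hj0 hjt
    have hj := hmain.2 j hj0 hjt
    by_cases hsj : s ≤ j
    · rwa [if_pos ⟨hsj, by omega⟩] at hj
    · rw [if_neg (by omega)] at hj
      exact pvOptC_ext (fun l => pvDec_below (by omega)) hj

lemma pvOuter_inv {target : Int} (rest : List Int) (hrest : ∀ x ∈ rest, x ∈ pvC)
    (P : List Int) (d : List (Int × Int)) (hd : pvInv target P d) :
    pvInv target (P ++ rest) (rest.foldl (fun d s => pvAInner target s d) d) := by
  induction rest generalizing P d with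
  | nil => simpa using hd
  | cons s t ih =>
    rw [List.foldl_cons]
    have h1 := pvAInner_inv (hrest s List.mem_cons_self) hd
    have h2 := ih (fun x hx => hrest x (List.mem_cons_of_mem s hx)) (P ++ [s]) _ h1
    have hPP : (P ++ [s]) ++ t = P ++ (s :: t) := by simp
    rwa [hPP] at h2

lemma pvSet_foldl (L : List Int) (hL : ∀ x ∈ L, 0 ≤ x) (v : Int × Int)
    (d : List (Int × Int)) :
    ((L.foldl (fun d i => d.set i.toNat v) d).length = d.length) ∧
    ∀ j : Int, 0 ≤ j → j.toNat < d.length →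
      pvGetA (L.foldl (fun d i => d.set i.toNat v) d) j =
        if j ∈ L then v else pvGetA d j := by
  induction L generalizing d with
  | nil => exact ⟨rfl, by intro j _ _; simp⟩
  | cons a t ih =>
    have ha0 := hL a List.mem_cons_self
    have hih := ih (fun x hx => hL x (List.mem_cons_of_mem a hx)) (d.set a.toNat v)
    rw [List.foldl_cons]
    refine ⟨by rw [hih.1]; simp, ?_⟩
    intro j hj0 hjd
    rw [hih.2 j hj0 (by simpa using hjd)]
    by_cases hjt : j ∈ t
    · simp [hjt]
    · rw [if_neg hjt]
      by_cases hja : j = a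
      · subst hja
        rw [if_pos List.mem_cons_self, pvGetA_set_self hj0 hjd]
      · rw [if_neg (by simp [hja, hjt]), pvGetA_set_ne ha0 hj0 hja]

lemma pvDec_empty_len {i : Int} {l : List Int} (h : pvDec [] i l) : l.length ≤ 1 := by
  have h2 := h.2.2
  have htrue : l.countP (fun _ => true) = l.length := congrFun List.countP_true l
  have : l.countP (fun x => decide (x ∉ ([] : List Int))) = l.length := by
    rw [← htrue]
    apply List.countP_congr
    intro a _
    simp
  omega

lemma pvOptC_base {j : Int} (hj : j ∈ pvC) : pvOptC [] j (1, pvE j) := by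
  have hj1 := (pvC_bounds j hj).1
  constructor
  · exact Or.inl ⟨[j], pvDec_single hj, pvCost_single j, by norm_num⟩
  · intro l hl _
    have hlen := pvDec_empty_len hl
    cases l with
    | nil =>
      exfalso
      have := hl.2.1
      simp at this
      omega
    | cons a t =>
      cases t with
      | cons b u => simp at hlen
      | nil =>
        have ha : a = j := by have := hl.2.1; simpa using this
        subst ha
        rw [pvCost_single]
        exact pvLe_refl _

lemma pvOptC_none {j : Int} (hjne : j ≠ 0) (hjc : j ∉ pvC) :
    pvOptC [] j (100001, 0) := by
  have hnol : ∀ l, pvDec [] j l → False := by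
    intro l hl
    have hlen := pvDec_empty_len hl
    cases l with
    | nil =>
      have := hl.2.1
      simp at this
      omega
    | cons a t =>
      cases t with
      | cons b u => simp at hlen
      | nil =>
        have ha : a = j := by have := hl.2.1; simpa using this
        exact hjc (ha ▸ hl.1 a List.mem_cons_self)
  exact ⟨Or.inr ⟨rfl, fun l hl => (hnol l hl).elim⟩, fun l hl _ => (hnol l hl).elim⟩

lemma pvSeed_inv (target : Int) (h0 : 0 ≤ target) :
    pvInv target []
      ((pvDoubleOrTriple.filter (fun x => decide (x ≤ target))).foldl
        (fun d i => d.set i.toNat (1, 0))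
        ((pvSingleOrBull.filter (fun x => decide (x ≤ target))).foldl
          (fun d i => d.set i.toNat (1, 1))
          ((List.replicate (target + 1).toNat ((100001:Int), (0:Int))).set 0 (0, 0)))) := by
  have hsb0 : ∀ x ∈ pvSingleOrBull.filter (fun x => decide (x ≤ target)), (0:Int) ≤ x := by
    intro x hx
    have := pvC_bounds x (List.mem_append_left _ (List.mem_filter.mp hx).1)
    omega
  have hdt0 : ∀ x ∈ pvDoubleOrTriple.filter (fun x => decide (x ≤ target)), (0:Int) ≤ x := by
    intro x hx
    have := pvC_bounds x (List.mem_append_right _ (List.mem_filter.mp hx).1)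
    omega
  have hlen0 : ((List.replicate (target + 1).toNat ((100001:Int), (0:Int))).set 0 (0, 0)).length
      = (target + 1).toNat := by simp
  have hsb := pvSet_foldl _ hsb0 (1, 1)
      ((List.replicate (target + 1).toNat ((100001:Int), (0:Int))).set 0 (0, 0))
  have hdt := pvSet_foldl _ hdt0 (1, 0)
      ((pvSingleOrBull.filter (fun x => decide (x ≤ target))).foldl
        (fun d i => d.set i.toNat (1, 1))
        ((List.replicate (target + 1).toNat ((100001:Int), (0:Int))).set 0 (0, 0)))
  refine ⟨by rw [hdt.1, hsb.1, hlen0], ?_⟩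
  intro j hj0 hjt
  have hjr : j.toNat < ((pvSingleOrBull.filter (fun x => decide (x ≤ target))).foldl
      (fun d i => d.set i.toNat (1, 1))
      ((List.replicate (target + 1).toNat ((100001:Int), (0:Int))).set 0 (0, 0))).length := by
    rw [hsb.1, hlen0]; omega
  have hjr0 : j.toNat < ((List.replicate (target + 1).toNat ((100001:Int), (0:Int))).set 0 (0, 0)).length := by
    rw [hlen0]; omega
  rw [hdt.2 j hj0 hjr, hsb.2 j hj0 hjr0]
  have hbase : pvGetA ((List.replicate (target + 1).toNat ((100001:Int), (0:Int))).set 0 (0, 0)) j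
      = if j = 0 then (0, 0) else (100001, 0) := by
    by_cases hj : j = 0
    · subst hj
      rw [if_pos rfl]
      exact pvGetA_set_self le_rfl (by simpa using hjr0)
    · rw [if_neg hj]
      unfold pvGetA
      rw [List.getD_eq_getElem?_getD,
        List.getElem?_set_ne (show (0:Nat) ≠ j.toNat by omega), List.getElem?_replicate]
      simp only [if_pos (show j.toNat < (target + 1).toNat by omega)]
      rfl
  by_cases hdtm : j ∈ pvDoubleOrTriple.filter (fun x => decide (x ≤ target))
  · rw [if_pos hdtm]
    have hmem := (List.mem_filter.mp hdtm).1
    have hjc : j ∈ pvC := List.mem_append_right _ hmem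
    have := pvOptC_base hjc
    rwa [pvE_dt j hmem] at this
  · rw [if_neg hdtm]
    by_cases hsbm : j ∈ pvSingleOrBull.filter (fun x => decide (x ≤ target))
    · rw [if_pos hsbm]
      have hmem := (List.mem_filter.mp hsbm).1
      have hjc : j ∈ pvC := List.mem_append_left _ hmem
      have := pvOptC_base hjc
      rwa [pvE_sb j hmem] at this
    · rw [if_neg hsbm, hbase]
      by_cases hj : j = 0
      · subst hj
        rw [if_pos rfl]
        exact pvOptC_zero []
      · rw [if_neg hj]
        have hjc : j ∉ pvC := by
          intro hc
          rcases List.mem_append.mp hc with h | h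
          · exact hsbm (List.mem_filter.mpr ⟨h, by simpa using hjt⟩)
          · exact hdtm (List.mem_filter.mpr ⟨h, by simpa using hjt⟩)
        exact pvOptC_none hj hjc

lemma pvA_opt (target : Int) (h0 : 0 ≤ target) :
    ∃ v, pvOptC pvC target v ∧ solution target = [v.1, v.2] := by
  refine ⟨pvGetA ((pvSingleOrBull ++ pvDoubleOrTriple).foldl (fun d s => pvAInner target s d)
      ((pvDoubleOrTriple.filter (fun x => decide (x ≤ target))).foldl
        (fun d i => d.set i.toNat (1, 0))
        ((pvSingleOrBull.filter (fun x => decide (x ≤ target))).foldl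
          (fun d i => d.set i.toNat (1, 1))
          ((List.replicate (target + 1).toNat ((100001:Int), (0:Int))).set 0 (0, 0))))) target,
    ?_, ?_⟩
  case refine_2 =>
    show solution target = _
    unfold solution
    simp only []
  have := pvOuter_inv (target := target) (pvSingleOrBull ++ pvDoubleOrTriple)
    (fun x hx => hx) [] _ (pvSeed_inv target h0)
  have h := this.2 target h0 le_rfl
  simpa using h

lemma pvDec_full (i : Int) (l : List Int) : pvDec pvC i l ↔ pvDecA i l := by
  constructor
  · exact fun h => ⟨h.1, h.2.1⟩
  · intro h
    refine ⟨h.1, h.2, ?_⟩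
    have : l.countP (fun x => decide (x ∉ pvC)) = 0 := by
      rw [List.countP_eq_zero]
      intro a ha
      simpa using h.1 a ha
    omega


-- ---------- B-side: BFS notions ----------
def pvReach (L i : Int) : Prop := ∃ l, pvDecA i l ∧ (l.length : Int) ≤ L
def pvOptN (i n : Int) : Prop :=
  (∃ l, pvDecA i l ∧ (l.length : Int) = n) ∧ ∀ l, pvDecA i l → n ≤ (l.length : Int)
def pvMaxS (i n m : Int) : Prop :=
  (∃ l, pvDecA i l ∧ (l.length : Int) = n ∧ (l.countP pvSingleP : Int) = m) ∧
  ∀ l, pvDecA i l → (l.length : Int) = n → (l.countP pvSingleP : Int) ≤ m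

lemma pvOptN_unique {i n n' : Int} (h : pvOptN i n) (h' : pvOptN i n') : n = n' := by
  obtain ⟨⟨l, hl, hc⟩, hb⟩ := h
  obtain ⟨⟨l', hl', hc'⟩, hb'⟩ := h'
  have := hb l' hl'
  have := hb' l hl
  omega

lemma pvOptN_reach {i n : Int} (h : pvOptN i n) : pvReach n i := by
  obtain ⟨⟨l, hl, hc⟩, _⟩ := h
  exact ⟨l, hl, by omega⟩

lemma pvReach_mono {L L' i : Int} (hLL : L ≤ L') (h : pvReach L i) : pvReach L' i := by
  obtain ⟨l, hl, hc⟩ := h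
  exact ⟨l, hl, by omega⟩

-- ---------- B-side: list get/set ----------
lemma pvGetT_set_self {d : List (Option Int)} {i : Int} {v : Option Int}
    (_h0 : 0 ≤ i) (hl : i.toNat < d.length) : pvGetT (d.set i.toNat v) i = v := by
  unfold pvGetT
  rw [List.getD_eq_getElem?_getD, List.getElem?_set_self (by omega)]
  simp

lemma pvGetT_set_ne {d : List (Option Int)} {i j : Int} {v : Option Int}
    (h0 : 0 ≤ i) (hj0 : 0 ≤ j) (hne : j ≠ i) : pvGetT (d.set i.toNat v) j = pvGetT d j := by
  unfold pvGetT
  rw [List.getD_eq_getElem?_getD, List.getD_eq_getElem?_getD,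
    List.getElem?_set_ne (by omega)]

lemma pvGetM_set_self {d : List Int} {i : Int} {v : Int}
    (_h0 : 0 ≤ i) (hl : i.toNat < d.length) : pvGetM (d.set i.toNat v) i = v := by
  unfold pvGetM
  rw [List.getD_eq_getElem?_getD, List.getElem?_set_self (by omega)]
  simp

lemma pvGetM_set_ne {d : List Int} {i j : Int} {v : Int}
    (h0 : 0 ≤ i) (hj0 : 0 ≤ j) (hne : j ≠ i) : pvGetM (d.set i.toNat v) j = pvGetM d j := by
  unfold pvGetM
  rw [List.getD_eq_getElem?_getD, List.getD_eq_getElem?_getD,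
    List.getElem?_set_ne (by omega)]

-- ---------- B-side: the per-level fold as a fold over (frontier value, score) pairs ----------
def pvPairs (fr : List Int) : List (Int × Int) :=
  fr.flatMap (fun v => pvScores.map (fun s => (v, s)))

lemma pvPairs_mem {fr : List Int} {p : Int × Int} :
    p ∈ pvPairs fr ↔ p.1 ∈ fr ∧ p.2 ∈ pvScores := by
  unfold pvPairs
  simp only [List.mem_flatMap, List.mem_map]
  constructor
  · rintro ⟨v, hv, s, hs, rfl⟩
    exact ⟨hv, hs⟩
  · rintro ⟨hv, hs⟩
    exact ⟨p.1, hv, p.2, hs, rfl⟩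

lemma pvFold_pairs_inner {α : Type} (g : α → Int → Int → α) (v : Int) :
    ∀ (ss : List Int) (init : α),
      ss.foldl (fun a s => g a v s) init
        = (ss.map (fun s => (v, s))).foldl (fun a p => g a p.1 p.2) init := by
  intro ss
  induction ss with
  | nil => intro init; rfl
  | cons s t ih => intro init; simp only [List.foldl_cons, List.map_cons]; exact ih _

lemma pvFold_pairs {α : Type} (g : α → Int → Int → α) :
    ∀ (fr : List Int) (init : α),
      fr.foldl (fun acc v => pvScores.foldl (fun a s => g a v s) acc) init
        = (pvPairs fr).foldl (fun a p => g a p.1 p.2) init := by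
  intro fr
  induction fr with
  | nil => intro init; rfl
  | cons v t ih =>
    intro init
    simp only [List.foldl_cons, pvPairs, List.flatMap_cons, List.foldl_append]
    rw [pvFold_pairs_inner g v pvScores init]
    exact ih _

lemma pvBLevel_eq_pairs (target level : Int) (th : List (Option Int)) (mx : List Int)
    (fr : List Int) :
    pvBLevel target level th mx fr
      = (pvPairs fr).foldl (fun a p => pvBVisit target level a p.1 p.2) (th, mx, []) := by
  unfold pvBLevel
  exact pvFold_pairs (pvBVisit target level) fr (th, mx, [])

-- ---------- B-side: partial invariant during one level ----------
def pvIsMax (m : Int) (xs : List Int) : Prop := m ∈ xs ∧ ∀ x ∈ xs, x ≤ m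

def pvCand (ps : List (Int × Int)) (i : Int) : List (Int × Int) :=
  ps.filter (fun p => decide (p.1 + p.2 = i))

def pvGain (mx0 : List Int) (p : Int × Int) : Int :=
  pvGetM mx0 p.1 + (if PySem.Set.contains pvSingles p.2 then 1 else 0)

lemma pvCand_append {ps : List (Int × Int)} {p : Int × Int} {i : Int} :
    pvCand (ps ++ [p]) i = pvCand ps i ++ (if p.1 + p.2 = i then [p] else []) := by
  unfold pvCand
  rw [List.filter_append]
  congr 1
  simp only [List.filter_cons, List.filter_nil]
  split_ifs with h1 h2 h3 <;> simp_all

lemma pvCand_mem {ps : List (Int × Int)} {i : Int} {q : Int × Int} :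
    q ∈ pvCand ps i ↔ q ∈ ps ∧ q.1 + q.2 = i := by
  unfold pvCand
  simp [List.mem_filter]

def pvPINV (target L : Int) (th0 : List (Option Int)) (mx0 : List Int)
    (ps : List (Int × Int)) (st : List (Option Int) × List Int × List Int) : Prop :=
  st.1.length = th0.length ∧ st.2.1.length = mx0.length ∧
  (∀ i, 0 ≤ i → i ≤ target →
    ((pvGetT th0 i).isSome → pvGetT st.1 i = pvGetT th0 i ∧ pvGetM st.2.1 i = pvGetM mx0 i) ∧
    (pvGetT th0 i = none →
      (pvCand ps i = [] → pvGetT st.1 i = none ∧ i ∉ st.2.2) ∧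
      (pvCand ps i ≠ [] → pvGetT st.1 i = some (L + 1) ∧ i ∈ st.2.2 ∧
        pvIsMax (pvGetM st.2.1 i) ((pvCand ps i).map (pvGain mx0))))) ∧
  (∀ w ∈ st.2.2, 0 ≤ w ∧ w ≤ target ∧ pvGetT th0 w = none)


lemma pvPINV_step {target L : Int} {th0 : List (Option Int)} {mx0 : List Int}
    {ps : List (Int × Int)} {st : List (Option Int) × List Int × List Int} (p : Int × Int)
    (hlen0 : th0.length = (target + 1).toNat) (hmlen0 : mx0.length = (target + 1).toNat)
    (hv0 : 0 ≤ p.1) (hvt : p.1 ≤ target) (hvs : (pvGetT th0 p.1).isSome)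
    (hbound : ∀ i d, 0 ≤ i → i ≤ target → pvGetT th0 i = some d → d ≤ L)
    (hs : p.2 ∈ pvScores)
    (h : pvPINV target L th0 mx0 ps st) :
    pvPINV target L th0 mx0 (ps ++ [p]) (pvBVisit target (L + 1) st p.1 p.2) := by
  obtain ⟨hL1, hL2, hmain, hnew⟩ := h
  have hsC : p.2 ∈ pvC := pvScores_sub p.2 hs
  have hs1 : 1 ≤ p.2 := (pvC_bounds p.2 hsC).1
  set w : Int := p.1 + p.2 with hwdef
  have hw0 : 0 ≤ w := by omega
  -- the gain read during the step is the gain w.r.t. the original maxs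
  have hmxv : pvGetM st.2.1 p.1 = pvGetM mx0 p.1 := ((hmain p.1 hv0 hvt).1 hvs).2
  have hgain : pvGetM st.2.1 p.1 + (if PySem.Set.contains pvSingles p.2 then 1 else 0)
      = pvGain mx0 p := by rw [pvGain, hmxv]
  by_cases hwt : w ≤ target
  case neg =>
    -- w > target: nothing happens, and no candidate in range gains a pair
    have hst : pvBVisit target (L + 1) st p.1 p.2 = st := by
      unfold pvBVisit
      rw [if_neg (by omega)]
    rw [hst]
    refine ⟨hL1, hL2, ?_, hnew⟩
    intro i hi0 hit
    have hcand : pvCand (ps ++ [p]) i = pvCand ps i := by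
      rw [pvCand_append, if_neg (by omega), List.append_nil]
    rw [hcand]
    exact hmain i hi0 hit
  case pos =>
    have hwr : w.toNat < st.1.length := by omega
    have hwr2 : w.toNat < st.2.1.length := by omega
    -- the candidate list at w gains exactly the pair p
    have hcw : pvCand (ps ++ [p]) w = pvCand ps w ++ [p] := by
      rw [pvCand_append, if_pos rfl]
    have hcne : ∀ i : Int, i ≠ w → pvCand (ps ++ [p]) i = pvCand ps i := by
      intro i hne
      rw [pvCand_append, if_neg (by omega), List.append_nil]
    cases hth0w : pvGetT th0 w with
    | some d0 =>
      -- w already settled at an earlier level: d0 ≤ L < L+1, so the step does nothing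
      have hkeep := (hmain w hw0 hwt).1 (by rw [hth0w]; rfl)
      have hd0 : d0 ≤ L := hbound w d0 hw0 hwt hth0w
      have hst : pvBVisit target (L + 1) st p.1 p.2 = st := by
        unfold pvBVisit
        rw [if_pos (show p.1 + p.2 ≤ target from hwt)]
        simp only []
        rw [show pvGetT st.1 (p.1 + p.2) = some d0 from hkeep.1.trans hth0w]
        simp only []
        rw [if_neg (by rintro ⟨he, -⟩; omega)]
      rw [hst]
      refine ⟨hL1, hL2, ?_, hnew⟩
      intro i hi0 hit
      by_cases hiw : i = w
      · subst hiw
        refine ⟨(hmain w hw0 hwt).1, ?_⟩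
        intro hcontra
        rw [hth0w] at hcontra
        exact absurd hcontra (by simp)
      · rw [hcne i hiw]
        exact hmain i hi0 hit
    | none =>
      rcases (hmain w hw0 hwt).2 hth0w with ⟨hempty, hfull⟩
      by_cases hce : pvCand ps w = []
      case pos =>
        -- first candidate for w in this level: fresh insertion
        obtain ⟨hTn, hNn⟩ := hempty hce
        have hst : pvBVisit target (L + 1) st p.1 p.2 =
            (st.1.set w.toNat (some (L + 1)),
             st.2.1.set w.toNat (pvGain mx0 p), st.2.2 ++ [w]) := by
          unfold pvBVisit
          rw [if_pos (show p.1 + p.2 ≤ target from hwt)]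
          simp only []
          rw [show pvGetT st.1 (p.1 + p.2) = none from hTn]
          simp only []
          rw [hgain]
        rw [hst]
        refine ⟨by simpa using hL1, by simpa using hL2, ?_, ?_⟩
        · intro i hi0 hit
          by_cases hiw : i = w
          · subst hiw
            constructor
            · intro hcontra
              rw [hth0w] at hcontra
              exact absurd hcontra (by simp)
            · intro _
              constructor
              · intro hc
                rw [hcw, hce] at hc
                simp at hc
              · intro _
                rw [hcw, hce]
                refine ⟨pvGetT_set_self hi0 hwr, by simp, ?_⟩
                rw [pvGetM_set_self hi0 hwr2]
                simp only [List.nil_append, List.map_cons, List.map_nil]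
                exact ⟨by simp, by intro x hx; simp at hx; omega⟩
          · have hT := pvGetT_set_ne (d := st.1) (v := some (L+1)) hw0 hi0 hiw
            have hM := pvGetM_set_ne (d := st.2.1) (v := pvGain mx0 p) hw0 hi0 hiw
            have hmem : i ∈ st.2.2 ++ [w] ↔ i ∈ st.2.2 := by
              simp [hiw]
            rw [hcne i hiw]
            obtain ⟨hS, hN⟩ := hmain i hi0 hit
            refine ⟨?_, ?_⟩
            · intro hsome
              obtain ⟨h1, h2⟩ := hS hsome
              exact ⟨hT.trans h1, hM.trans h2⟩
            · intro hnone
              obtain ⟨he, hf⟩ := hN hnone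
              refine ⟨?_, ?_⟩
              · intro hc
                obtain ⟨h1, h2⟩ := he hc
                exact ⟨hT.trans h1, by rw [hmem]; exact h2⟩
              · intro hc
                obtain ⟨h1, h2, h3⟩ := hf hc
                exact ⟨hT.trans h1, by rw [hmem]; exact h2, by rw [hM]; exact h3⟩
        · intro x hx
          rcases List.mem_append.mp hx with hx1 | hx2
          · exact hnew x hx1
          · rw [List.mem_singleton] at hx2
            subst hx2
            exact ⟨hw0, hwt, hth0w⟩
      case neg =>
        -- w already reached this level: the entry is some (L+1); maybe improve maxs
        obtain ⟨hT1, hmem1, hmax1⟩ := hfull hce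
        by_cases himp : pvGetM st.2.1 w < pvGain mx0 p
        case pos =>
          have hst : pvBVisit target (L + 1) st p.1 p.2 =
              (st.1, st.2.1.set w.toNat (pvGain mx0 p), st.2.2) := by
            unfold pvBVisit
            rw [if_pos (show p.1 + p.2 ≤ target from hwt)]
            simp only []
            rw [show pvGetT st.1 (p.1 + p.2) = some (L+1) from hT1]
            simp only [hgain]
            rw [if_pos (by refine ⟨?_, himp⟩; simp)]
          rw [hst]
          refine ⟨hL1, by simpa using hL2, ?_, hnew⟩
          intro i hi0 hit
          by_cases hiw : i = w
          · subst hiw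
            constructor
            · intro hcontra
              rw [hth0w] at hcontra
              exact absurd hcontra (by simp)
            · intro _
              constructor
              · intro hc
                rw [hcw] at hc
                simp at hc
              · intro _
                rw [hcw]
                refine ⟨hT1, hmem1, ?_⟩
                rw [pvGetM_set_self hi0 hwr2, List.map_append]
                constructor
                · simp
                · intro x hx
                  rcases List.mem_append.mp hx with hx1 | hx2
                  · have := hmax1.2 x hx1
                    omega
                  · simp at hx2
                    omega
          · have hM := pvGetM_set_ne (d := st.2.1) (v := pvGain mx0 p) hw0 hi0 hiw
            rw [hcne i hiw]
            obtain ⟨hS, hN⟩ := hmain i hi0 hit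
            refine ⟨?_, ?_⟩
            · intro hsome
              obtain ⟨h1, h2⟩ := hS hsome
              exact ⟨h1, hM.trans h2⟩
            · intro hnone
              obtain ⟨he, hf⟩ := hN hnone
              refine ⟨he, ?_⟩
              intro hc
              obtain ⟨h1, h2, h3⟩ := hf hc
              exact ⟨h1, h2, by rw [hM]; exact h3⟩
        case neg =>
          have hst : pvBVisit target (L + 1) st p.1 p.2 = st := by
            unfold pvBVisit
            rw [if_pos (show p.1 + p.2 ≤ target from hwt)]
            simp only []
            rw [show pvGetT st.1 (p.1 + p.2) = some (L+1) from hT1]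
            simp only [hgain]
            rw [if_neg (by rintro ⟨-, hlt⟩; exact himp hlt)]
          rw [hst]
          refine ⟨hL1, hL2, ?_, hnew⟩
          intro i hi0 hit
          by_cases hiw : i = w
          · subst hiw
            constructor
            · intro hcontra
              rw [hth0w] at hcontra
              exact absurd hcontra (by simp)
            · intro _
              refine ⟨?_, ?_⟩
              · intro hc
                rw [hcw] at hc
                simp at hc
              · intro _
                rw [hcw]
                refine ⟨hT1, hmem1, ?_⟩
                rw [List.map_append]
                constructor
                · exact List.mem_append_left _ hmax1.1
                · intro x hx
                  rcases List.mem_append.mp hx with hx1 | hx2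
                  · exact hmax1.2 x hx1
                  · simp at hx2
                    omega
          · rw [hcne i hiw]
            exact hmain i hi0 hit


lemma pvPINV_fold {target L : Int} {th0 : List (Option Int)} {mx0 : List Int}
    (hlen0 : th0.length = (target + 1).toNat) (hmlen0 : mx0.length = (target + 1).toNat)
    (hbound : ∀ i d, 0 ≤ i → i ≤ target → pvGetT th0 i = some d → d ≤ L)
    (ps : List (Int × Int))
    (hps : ∀ p ∈ ps, 0 ≤ p.1 ∧ p.1 ≤ target ∧ (pvGetT th0 p.1).isSome ∧ p.2 ∈ pvScores) :
    pvPINV target L th0 mx0 ps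
      (ps.foldl (fun a p => pvBVisit target (L + 1) a p.1 p.2) (th0, mx0, [])) := by
  induction ps using List.reverseRecOn with
  | nil =>
    refine ⟨rfl, rfl, ?_, by simp⟩
    intro i hi0 hit
    refine ⟨fun _ => ⟨rfl, rfl⟩, ?_⟩
    intro hnone
    refine ⟨fun _ => ⟨hnone, by simp⟩, ?_⟩
    intro hc
    exact absurd rfl hc
  | append_singleton ps p ih =>
    rw [List.foldl_append, List.foldl_cons, List.foldl_nil]
    have hp := hps p (List.mem_append_right _ (List.mem_singleton_self p))
    exact pvPINV_step p hlen0 hmlen0 hp.1 hp.2.1 hp.2.2.1 hbound hp.2.2.2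
      (ih (fun q hq => hps q (List.mem_append_left _ hq)))

-- ---------- B-side: the level invariant ----------
def pvINV (target L : Int) (th : List (Option Int)) (mx : List Int) (fr : List Int) : Prop :=
  th.length = (target + 1).toNat ∧ mx.length = (target + 1).toNat ∧
  (∀ i, 0 ≤ i → i ≤ target →
    ((pvGetT th i).isSome ↔ pvReach L i) ∧
    (∀ d, pvGetT th i = some d → pvOptN i d ∧ d ≤ L ∧ pvMaxS i d (pvGetM mx i))) ∧
  (∀ v, v ∈ fr ↔ (0 ≤ v ∧ v ≤ target ∧ pvOptN v L))

lemma pvINV_level {target L : Int} {th : List (Option Int)} {mx : List Int} {fr : List Int}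
    (h0 : 0 ≤ target) (hL : 0 ≤ L) (hinv : pvINV target L th mx fr) :
    pvINV target (L + 1) (pvBLevel target (L + 1) th mx fr).1
      (pvBLevel target (L + 1) th mx fr).2.1 (pvBLevel target (L + 1) th mx fr).2.2 := by
  obtain ⟨hlen, hmlen, hmain, hfr⟩ := hinv
  -- frontier entries hold exactly the value L with their max singles
  have hfrL : ∀ v ∈ fr, pvGetT th v = some L ∧ pvMaxS v L (pvGetM mx v) := by
    intro v hv
    obtain ⟨hv0, hvt, hopt⟩ := (hfr v).mp hv
    have hsome : (pvGetT th v).isSome := ((hmain v hv0 hvt).1).mpr (pvOptN_reach hopt)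
    obtain ⟨d, hd⟩ := Option.isSome_iff_exists.mp hsome
    obtain ⟨hoptd, _, hms⟩ := (hmain v hv0 hvt).2 d hd
    have : d = L := pvOptN_unique hoptd hopt
    subst this
    exact ⟨hd, hms⟩
  have hbound : ∀ i d, 0 ≤ i → i ≤ target → pvGetT th i = some d → d ≤ L := by
    intro i d hi0 hit hd
    exact ((hmain i hi0 hit).2 d hd).2.1
  have hps : ∀ p ∈ pvPairs fr, 0 ≤ p.1 ∧ p.1 ≤ target ∧ (pvGetT th p.1).isSome ∧
      p.2 ∈ pvScores := by
    intro p hp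
    obtain ⟨hp1, hp2⟩ := pvPairs_mem.mp hp
    obtain ⟨h1, h2, _⟩ := (hfr p.1).mp hp1
    exact ⟨h1, h2, by rw [(hfrL p.1 hp1).1]; rfl, hp2⟩
  have hP := pvPINV_fold hlen hmlen hbound (pvPairs fr) hps
  rw [pvBLevel_eq_pairs]
  set st := (pvPairs fr).foldl (fun a p => pvBVisit target (L + 1) a p.1 p.2) (th, mx, [])
    with hstdef
  obtain ⟨hl1, hl2, hm, hn⟩ := hP
  -- candidates at an unreached i correspond exactly to (L+1)-step decompositions
  have hcand_of : ∀ i, 0 ≤ i → i ≤ target → pvGetT th i = none →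
      ∀ q ∈ pvCand (pvPairs fr) i, ∃ l, pvDecA i l ∧ (l.length : Int) = L + 1 ∧
        (l.countP pvSingleP : Int) = pvGain mx q := by
    intro i hi0 hit hnone q hq
    obtain ⟨hqps, hqsum⟩ := pvCand_mem.mp hq
    obtain ⟨hq1, hq2⟩ := pvPairs_mem.mp hqps
    obtain ⟨hv0, hvt, hopt⟩ := (hfr q.1).mp hq1
    obtain ⟨_, hms⟩ := hfrL q.1 hq1
    obtain ⟨lv, hlv, hlvlen, hlvcnt⟩ := hms.1
    have hsC : q.2 ∈ pvC := pvScores_sub q.2 hq2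
    refine ⟨q.2 :: lv, ⟨?_, ?_⟩, ?_, ?_⟩
    · intro x hx
      rcases List.mem_cons.mp hx with rfl | hx'
      · exact hsC
      · exact hlv.1 x hx'
    · rw [List.sum_cons, hlv.2]
      omega
    · rw [List.length_cons]
      push_cast
      omega
    · rw [List.countP_cons]
      unfold pvGain
      rw [pvSingles_contains q.2 hsC]
      push_cast
      omega
  have hcand_to : ∀ i, 0 ≤ i → i ≤ target → pvGetT th i = none →
      ∀ l, pvDecA i l → (l.length : Int) = L + 1 →
        ∃ q ∈ pvCand (pvPairs fr) i, (l.countP pvSingleP : Int) ≤ pvGain mx q := by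
    intro i hi0 hit hnone l hl hllen
    have hnr : ¬ pvReach L i := by
      intro hr
      have := ((hmain i hi0 hit).1).mpr hr
      rw [hnone] at this
      exact absurd this (by simp)
    cases l with
    | nil =>
      exfalso
      rw [List.length_nil] at hllen
      push_cast at hllen
      omega
    | cons a t =>
      have haC : a ∈ pvC := hl.1 a List.mem_cons_self
      have ha1 := (pvC_bounds a haC).1
      have ht : pvDecA (i - a) t := by
        refine ⟨fun y hy => hl.1 y (List.mem_cons_of_mem a hy), ?_⟩
        have := hl.2
        rw [List.sum_cons] at this
        omega
      have htlen : (t.length : Int) = L := by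
        rw [List.length_cons] at hllen
        push_cast at hllen
        omega
      have hia0 : 0 ≤ i - a := by
        have := pvSum_nonneg ht.1
        rw [ht.2] at this
        omega
      have hiat : i - a ≤ target := by omega
      have hoptia : pvOptN (i - a) L := by
        refine ⟨⟨t, ht, htlen⟩, ?_⟩
        intro u hu
        by_contra hcon
        push_neg at hcon
        exact hnr ⟨a :: u, ⟨fun y hy => by
            rcases List.mem_cons.mp hy with rfl | hy'
            · exact haC
            · exact hu.1 y hy', by rw [List.sum_cons, hu.2]; omega⟩, by
          rw [List.length_cons]; push_cast; omega⟩
      have hvfr : i - a ∈ fr := (hfr (i - a)).mpr ⟨hia0, hiat, hoptia⟩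
      have hq : ((i - a, a) : Int × Int) ∈ pvCand (pvPairs fr) i := by
        rw [pvCand_mem]
        refine ⟨pvPairs_mem.mpr ⟨hvfr, pvC_sub a haC⟩, by omega⟩
      refine ⟨(i - a, a), hq, ?_⟩
      obtain ⟨_, hms⟩ := hfrL (i - a) hvfr
      have hbt := hms.2 t ht htlen
      unfold pvGain
      rw [pvSingles_contains a haC]
      rw [List.countP_cons]
      split_ifs with hsp
      · push_cast
        omega
      · push_cast
        omega
  -- candidates exist at i iff i is first reached at level L+1
  have hnreach : ∀ i, 0 ≤ i → i ≤ target → pvGetT th i = none → ¬ pvReach L i := by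
    intro i hi0 hit hnone hr
    have := ((hmain i hi0 hit).1).mpr hr
    rw [hnone] at this
    exact absurd this (by simp)
  have hkey : ∀ i, 0 ≤ i → i ≤ target → pvGetT th i = none →
      (pvCand (pvPairs fr) i ≠ [] ↔ pvReach (L + 1) i) := by
    intro i hi0 hit hnone
    have hnr := hnreach i hi0 hit hnone
    constructor
    · intro hc
      obtain ⟨q, hq⟩ := List.exists_mem_of_ne_nil _ hc
      obtain ⟨l, hl, hlen', _⟩ := hcand_of i hi0 hit hnone q hq
      exact ⟨l, hl, by omega⟩
    · rintro ⟨l, hl, hle⟩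
      have hllen : (l.length : Int) = L + 1 := by
        by_contra hne
        exact hnr ⟨l, hl, by omega⟩
      obtain ⟨q, hq, _⟩ := hcand_to i hi0 hit hnone l hl hllen
      exact List.ne_nil_of_mem hq
  have hoptn_of : ∀ i, 0 ≤ i → i ≤ target → pvGetT th i = none →
      pvCand (pvPairs fr) i ≠ [] → pvOptN i (L + 1) := by
    intro i hi0 hit hnone hce
    have hnr := hnreach i hi0 hit hnone
    obtain ⟨l, hl, hle⟩ := (hkey i hi0 hit hnone).mp hce
    have hllen : (l.length : Int) = L + 1 := by
      by_contra hne
      exact hnr ⟨l, hl, by omega⟩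
    refine ⟨⟨l, hl, hllen⟩, ?_⟩
    intro u hu
    by_contra hcon
    push_neg at hcon
    exact hnr ⟨u, hu, by omega⟩
  refine ⟨by rw [hl1, hlen], by rw [hl2, hmlen], ?_, ?_⟩
  · intro i hi0 hit
    cases hthio : pvGetT th i with
    | some d =>
      obtain ⟨hTeq, hMeq⟩ := (hm i hi0 hit).1 (by rw [hthio]; rfl)
      obtain ⟨hopt, hdle, hms⟩ := (hmain i hi0 hit).2 d hthio
      constructor
      · rw [hTeq, hthio]
        simp only [Option.isSome_some, true_iff]
        exact pvReach_mono (by omega) (((hmain i hi0 hit).1).mp (by rw [hthio]; rfl))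
      · intro d' hd'
        rw [hTeq, hthio] at hd'
        cases hd'
        rw [hMeq]
        exact ⟨hopt, by omega, hms⟩
    | none =>
      obtain ⟨hempty, hfull⟩ := (hm i hi0 hit).2 hthio
      by_cases hce : pvCand (pvPairs fr) i = []
      · obtain ⟨hTn, _⟩ := hempty hce
        constructor
        · constructor
          · intro hsome
            rw [hTn] at hsome
            exact absurd hsome (by simp)
          · intro hr
            exact absurd ((hkey i hi0 hit hthio).mpr hr) (fun h => h hce)
        · intro d' hd'
          rw [hTn] at hd'
          exact absurd hd' (by simp)
      · obtain ⟨hT1, _, hmax⟩ := hfull hce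
        have hreach : pvReach (L + 1) i := (hkey i hi0 hit hthio).mp hce
        have hoptn : pvOptN i (L + 1) := hoptn_of i hi0 hit hthio hce
        constructor
        · rw [hT1]
          simp only [Option.isSome_some, true_iff]
          exact hreach
        · intro d' hd'
          rw [hT1] at hd'
          cases hd'
          refine ⟨hoptn, by omega, ?_, ?_⟩
          · obtain ⟨hmem, _⟩ := hmax
            obtain ⟨q, hq, hqv⟩ := List.mem_map.mp hmem
            obtain ⟨l, hl, hlen', hcnt⟩ := hcand_of i hi0 hit hthio q hq
            exact ⟨l, hl, hlen', by rw [hcnt, hqv]⟩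
          · intro l hl hllen
            obtain ⟨q, hq, hle⟩ := hcand_to i hi0 hit hthio l hl hllen
            have := hmax.2 (pvGain mx q) (List.mem_map_of_mem hq)
            omega
  · intro v
    constructor
    · intro hv
      obtain ⟨hv0, hvt, hvnone⟩ := hn v hv
      obtain ⟨hempty, hfull⟩ := (hm v hv0 hvt).2 hvnone
      have hce : pvCand (pvPairs fr) v ≠ [] := by
        intro hc
        exact (hempty hc).2 hv
      exact ⟨hv0, hvt, hoptn_of v hv0 hvt hvnone hce⟩
    · rintro ⟨hv0, hvt, hopt⟩
      have hnr : ¬ pvReach L v := by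
        rintro ⟨l, hl, hle⟩
        have := hopt.2 l hl
        omega
      have hvnone : pvGetT th v = none := by
        cases hth : pvGetT th v with
        | none => rfl
        | some d =>
          exfalso
          exact hnr (((hmain v hv0 hvt).1).mp (by rw [hth]; rfl))
      have hce : pvCand (pvPairs fr) v ≠ [] :=
        (hkey v hv0 hvt hvnone).mpr (pvOptN_reach hopt)
      obtain ⟨hempty, hfull⟩ := (hm v hv0 hvt).2 hvnone
      exact (hfull hce).2.1


-- ---------- B-side: start state, loop, correctness ----------
lemma pvDecA_zero : pvDecA 0 [] := ⟨by simp, by simp⟩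

lemma pvOptN_zero : pvOptN 0 0 := by
  refine ⟨⟨[], pvDecA_zero, by simp⟩, ?_⟩
  intro l _
  omega

lemma pvMaxS_zero : pvMaxS 0 0 0 := by
  refine ⟨⟨[], pvDecA_zero, by simp, by simp⟩, ?_⟩
  intro l hl hlen
  have : l = [] := by
    cases l with
    | nil => rfl
    | cons a t => rw [List.length_cons] at hlen; push_cast at hlen; omega
  subst this
  simp

lemma pvINV_init (target : Int) (h0 : 0 ≤ target) :
    pvINV target 0 ((List.replicate (target + 1).toNat (none : Option Int)).set 0 (some 0))
      (List.replicate (target + 1).toNat (0 : Int)) [0] := by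
  have hlen : ((List.replicate (target + 1).toNat (none : Option Int)).set 0 (some 0)).length
      = (target + 1).toNat := by simp
  have hget : ∀ i : Int, 0 ≤ i → i ≤ target →
      pvGetT ((List.replicate (target + 1).toNat (none : Option Int)).set 0 (some 0)) i
        = if i = 0 then some 0 else none := by
    intro i hi0 hit
    by_cases hi : i = 0
    · subst hi
      rw [if_pos rfl]
      exact pvGetT_set_self le_rfl (by simp; omega)
    · rw [if_neg hi]
      unfold pvGetT
      rw [List.getD_eq_getElem?_getD,
        List.getElem?_set_ne (show (0:Nat) ≠ i.toNat by omega), List.getElem?_replicate]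
      simp only [if_pos (show i.toNat < (target + 1).toNat by omega)]
      rfl
  have hmx : ∀ i : Int, pvGetM (List.replicate (target + 1).toNat (0 : Int)) i = 0 := by
    intro i
    unfold pvGetM
    rw [List.getD_eq_getElem?_getD, List.getElem?_replicate]
    split_ifs <;> rfl
  have hnr : ∀ i : Int, i ≠ 0 → ¬ pvReach 0 i := by
    rintro i hi ⟨l, hl, hle⟩
    have : l = [] := by
      cases l with
      | nil => rfl
      | cons a t => rw [List.length_cons] at hle; push_cast at hle; omega
    subst this
    have := hl.2
    simp at this
    omega
  refine ⟨hlen, by simp, ?_, ?_⟩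
  · intro i hi0 hit
    rw [hget i hi0 hit]
    by_cases hi : i = 0
    · subst hi
      rw [if_pos rfl]
      constructor
      · simp only [Option.isSome_some, true_iff]
        exact pvOptN_reach pvOptN_zero
      · intro d hd
        cases hd
        rw [hmx]
        exact ⟨pvOptN_zero, le_rfl, pvMaxS_zero⟩
    · rw [if_neg hi]
      constructor
      · constructor
        · intro hsome
          exact absurd hsome (by simp)
        · intro hr
          exact absurd hr (hnr i hi)
      · intro d hd
        exact absurd hd (by simp)
  · intro v
    simp only [List.mem_singleton]
    constructor
    · rintro rfl
      exact ⟨le_rfl, h0, pvOptN_zero⟩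
    · rintro ⟨hv0, hvt, hopt⟩
      obtain ⟨l', hl', hlc'⟩ := hopt.1
      have : l' = [] := by
        cases l' with
        | nil => rfl
        | cons a t => rw [List.length_cons] at hlc'; push_cast at hlc'; omega
      subst this
      have := hl'.2
      simp at this
      omega

lemma pvBLoop_correct (target : Int) (h0 : 0 ≤ target) :
    ∀ (fuel : Nat) (L : Int) (th : List (Option Int)) (mx : List Int) (fr : List Int),
      0 ≤ L → L ≤ 100001 → pvINV target L th mx fr →
      (100001 - L).toNat < fuel →
      ((pvReach 100001 target →
          ∃ n, pvGetT (pvBLoop target fuel L (th, mx, fr)).1 target = some n ∧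
            pvOptN target n ∧
            pvMaxS target n (pvGetM (pvBLoop target fuel L (th, mx, fr)).2 target)) ∧
        (¬ pvReach 100001 target →
          pvGetT (pvBLoop target fuel L (th, mx, fr)).1 target = none)) := by
  intro fuel
  induction fuel with
  | zero =>
    intro L _ _ _ hL hL2 _ hf
    exact absurd hf (by omega)
  | succ n ih =>
    intro L th mx fr hL hL2 hinv hf
    cases hts : pvGetT th target with
    | some d =>
      have hred : pvBLoop target (n + 1) L (th, mx, fr) = (th, mx) := by
        simp only [pvBLoop, hts]
      rw [hred]
      obtain ⟨hoptd, _, hms⟩ := (hinv.2.2.1 target h0 le_rfl).2 d hts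
      refine ⟨fun _ => ⟨d, hts, hoptd, hms⟩, ?_⟩
      intro hnr
      exfalso
      exact hnr (pvReach_mono hL2 (((hinv.2.2.1 target h0 le_rfl).1).mp (by rw [hts]; rfl)))
    | none =>
      by_cases hcap : L < 100001
      case pos =>
        have hred : pvBLoop target (n + 1) L (th, mx, fr)
            = pvBLoop target n (L + 1) (pvBLevel target (L + 1) th mx fr) := by
          simp only [pvBLoop, hts]
          rw [if_pos hcap]
        rw [hred]
        have hlev := pvINV_level h0 hL hinv
        have := ih (L + 1) (pvBLevel target (L + 1) th mx fr).1
          (pvBLevel target (L + 1) th mx fr).2.1 (pvBLevel target (L + 1) th mx fr).2.2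
          (by omega) (by omega) hlev (by omega)
        simpa using this
      case neg =>
        have hLeq : L = 100001 := by omega
        have hred : pvBLoop target (n + 1) L (th, mx, fr) = (th, mx) := by
          simp only [pvBLoop, hts]
          rw [if_neg hcap]
        rw [hred]
        constructor
        · intro hr
          exfalso
          have := ((hinv.2.2.1 target h0 le_rfl).1).mpr (hLeq ▸ hr)
          rw [hts] at this
          exact absurd this (by simp)
        · intro _
          exact hts

lemma pvB_val (target : Int) (h0 : 0 ≤ target) :
    (∃ n m, solution_alt target = [n, m] ∧ pvOptN target n ∧ pvMaxS target n m ∧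
        n ≤ 100001) ∨
    (solution_alt target = [100001, 0] ∧ ¬ pvReach 100001 target) := by
  have hmain := pvBLoop_correct target h0 100002 0
    ((List.replicate (target + 1).toNat (none : Option Int)).set 0 (some 0))
    (List.replicate (target + 1).toNat (0 : Int)) [0] le_rfl (by norm_num)
    (pvINV_init target h0) (by norm_num)
  by_cases hr : pvReach 100001 target
  · obtain ⟨n, hsome, hoptn, hms⟩ := hmain.1 hr
    left
    refine ⟨n, _, ?_, hoptn, hms, ?_⟩
    · simp only [solution_alt]
      rw [hsome]
    · obtain ⟨l, hl, hle⟩ := hr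
      have := hoptn.2 l hl
      omega
  · right
    have hnone := hmain.2 hr
    refine ⟨?_, hr⟩
    simp only [solution_alt]
    rw [hnone]

-- ---------- assembling the two ports ----------
lemma pvAgree (t : Int) (h0 : 0 ≤ t) : solution t = solution_alt t := by
  obtain ⟨v, hvC, hvout⟩ := pvA_opt t h0
  rcases pvB_val t h0 with ⟨n, m, hbout, hoptn, hms, hn1⟩ | ⟨hbout, hnr⟩
  · -- the optimum needs at most 100001 throws: both ports report it
    obtain ⟨lb, hlb, hlblen, hlbcnt⟩ := hms.1
    have hcb : pvCost lb = (n, m) := by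
      unfold pvCost
      rw [Prod.ext_iff]
      exact ⟨hlblen, hlbcnt⟩
    have hvatt : ∃ l, pvDecA t l ∧ pvCost l = v ∧ v.1 ≤ 100001 := by
      rcases hvC.1 with ⟨l, hl, hc, hle⟩ | ⟨he, hall⟩
      · exact ⟨l, (pvDec_full t l).mp hl, hc, hle⟩
      · exfalso
        have := hall lb ((pvDec_full t lb).mpr hlb)
        unfold pvCost at this
        omega
    obtain ⟨lv, hlv, hcv, hvle⟩ := hvatt
    have h1 : pvLe v (n, m) := by
      have := hvC.2 lb ((pvDec_full t lb).mpr hlb) (by rw [hcb]; exact hn1)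
      rwa [hcb] at this
    have h2 : pvLe (n, m) v := by
      rw [← hcv]
      have hnle := hoptn.2 lv hlv
      have hcv1 : (pvCost lv).1 = (lv.length : Int) := rfl
      by_cases heq : n = (lv.length : Int)
      · right
        refine ⟨by rw [hcv1]; omega, ?_⟩
        have := hms.2 lv hlv heq.symm
        show (pvCost lv).2 ≤ m
        unfold pvCost
        omega
      · left
        rw [hcv1]
        omega
    have hv : v = (n, m) := pvLe_antisymm h1 h2
    rw [hvout, hbout, hv]
  · -- unreachable within the sentinel: both ports report the sentinel pair
    have hv : v = (100001, 0) := by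
      rcases hvC.1 with ⟨l, hl, hc, hle⟩ | ⟨he, _⟩
      · exfalso
        exact hnr ⟨l, (pvDec_full t l).mp hl, by
          have hfst := congrArg Prod.fst hc
          unfold pvCost at hfst
          simp only [] at hfst
          omega⟩
      · exact he
    rw [hvout, hbout, hv]

-- ===== VERDICT (by name: the statement is the Claim_ definition above) =====
theorem solution_spec : Claim_equal_solution := by
  intro target _ hpre
  unfold Spec_solution
  exact pvAgree target hpre
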